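-- pv_equiv track=rewrite | github.com/jschnab/leetcode | strings/shifting_letters.py | shifting_fenwick
-- ===== SOURCE A (Python) =====
-- class Fenwick:
--     def __init__(self, items):
--         self.items = [0] * (len(items) + 1)
--         for i, x in enumerate(items):
--             self.update_item(i, x)
--
--     def lsb(self, x):
--         return x & -x
--
--     def update_item(self, i, x):
--         i += 1
--         while i < len(self.items):
--             self.items[i] += x
--             i += self.lsb(i)
--
--     def prefix_sum(self, i):
--         i += 1
--         s = self.items[0]
--         while i > 0:
--             s += self.items[i]
--             i -= self.lsb(i)
--         return s
--
-- def shifting_fenwick(S, shifts):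
--     """
--     This time we will store all shifts, so to have better time complexity we
--     use a Fenwick tree (aka binary-indexed tree) to calculate shift sums.
--
--     Time complexity: O(nlogn) to iterate through S or shifts items then call
--     update_item or prefix_sum methods on the tree, which take O(logn).
--     Space complexity: O(n) to store shifts in the tree.
--     """
--     f = Fenwick([0] * (len(S) + 1))
--     for start, end, direction in shifts:
--         if direction:
--             f.update_item(start, 1)
--             f.update_item(end + 1, -1)
--         else:
--             f.update_item(start, -1)
--             f.update_item(end + 1, 1)
--     result = []
--     for i in range(len(S)):
--         result.append(
--             chr((ord(S[i]) - ord("a") + f.prefix_sum(i)) % 26 + ord("a"))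
--         )
--     return "".join(result)
-- ===== SOURCE B (Python) =====
-- def shifting_fenwick(S, shifts):
--     """Difference array + one running-sum pass: O(n + m) instead of Fenwick-tree O((n+m) log n)."""
--     n = len(S)
--     diff = [0] * (n + 1)
--     for start, end, direction in shifts:
--         d = 1 if direction else -1
--         if start <= n:
--             diff[start] += d
--         if end + 1 <= n:
--             diff[end + 1] -= d
--     out = []
--     run = 0
--     for i, c in enumerate(S):
--         run += diff[i]
--         out.append(chr((ord(c) - ord("a") + run) % 26 + ord("a")))
--     return "".join(out)
-- ===== Notes on version B (the rewrite author's own statement) =====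
-- stated objective: faster
-- what changed: Replaces the Fenwick (binary-indexed) tree and its per-query log-time bit loops by a plain difference array updated in O(1) per shift and folded into the answer with a single running-sum pass.
import Mathlib
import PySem

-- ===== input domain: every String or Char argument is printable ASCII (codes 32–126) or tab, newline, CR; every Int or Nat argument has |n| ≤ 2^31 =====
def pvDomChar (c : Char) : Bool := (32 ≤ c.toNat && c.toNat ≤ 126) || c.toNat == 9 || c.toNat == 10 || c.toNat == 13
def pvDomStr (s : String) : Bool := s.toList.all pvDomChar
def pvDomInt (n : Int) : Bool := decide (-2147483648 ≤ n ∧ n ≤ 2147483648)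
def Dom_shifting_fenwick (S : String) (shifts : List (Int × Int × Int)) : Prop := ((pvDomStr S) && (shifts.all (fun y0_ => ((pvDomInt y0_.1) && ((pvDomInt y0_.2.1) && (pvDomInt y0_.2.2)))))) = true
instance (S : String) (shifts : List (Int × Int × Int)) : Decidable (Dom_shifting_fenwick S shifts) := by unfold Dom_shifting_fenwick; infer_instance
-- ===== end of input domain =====

-- B replaces A's Fenwick tree by a difference array with one running-sum pass (O(n+m) vs O((n+m)·log n)).
-- Pre_ excludes only inputs on which A never returns: a shift with start < 0 or end < -1 drives the
-- Fenwick update index to 0, where `i += i & -i` loops forever.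


-- ===== PORT A =====

-- self.lsb(x) = x & -x
def pvLsb (x : Int) : Int := PySem.Int.band x (-x)

-- the body of `update_item` after `i += 1`: while i < len(items): items[i] += x; i += lsb(i).
-- Fuel makes the while-loop total: on inputs admitted by Pre_ the index i starts ≥ 1 and grows by
-- lsb(i) ≥ 1 each pass, so `items.length` iterations always reach the exit condition.
def pvUpdLoop (items : List Int) (i x : Int) : Nat → List Int
  | 0 => items
  | fuel + 1 =>
    if i < PySem.List.len items then
      pvUpdLoop (PySem.List.pySetD items i (PySem.List.pyGetD items i 0 + x)) (i + pvLsb i) x fuel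
    else items

-- update_item(i, x)
def pvUpdate (items : List Int) (i x : Int) : List Int :=
  pvUpdLoop items (i + 1) x items.length

-- the body of `prefix_sum` after `i += 1` and `s = items[0]`: while i > 0: s += items[i]; i -= lsb(i).
-- Fuel: i decreases by lsb(i) ≥ 1 each pass, so i iterations suffice.
def pvQLoop (items : List Int) (i s : Int) : Nat → Int
  | 0 => s
  | fuel + 1 =>
    if 0 < i then
      pvQLoop items (i - pvLsb i) (s + PySem.List.pyGetD items i 0) fuel
    else s

-- prefix_sum(i)
def pvPrefix (items : List Int) (i : Int) : Int :=
  pvQLoop items (i + 1) (PySem.List.pyGetD items 0 0) (i + 1).toNat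

-- Fenwick([0] * (len(S) + 1)): items = [0] * (len(S) + 2), then update_item(i, 0) for each i
def pvFenwickInit (n : Nat) : List Int :=
  (List.range (n + 1)).foldl (fun it (i : Nat) => pvUpdate it (i : Int) 0) (List.replicate (n + 2) 0)

-- the body of the `for start, end, direction in shifts` loop
def pvApplyShift (it : List Int) (sh : Int × Int × Int) : List Int :=
  if sh.2.2 ≠ 0 then
    pvUpdate (pvUpdate it sh.1 1) (sh.2.1 + 1) (-1)
  else
    pvUpdate (pvUpdate it sh.1 (-1)) (sh.2.1 + 1) 1

def shifting_fenwick (S : String) (shifts : List (Int × Int × Int)) : String :=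
  let n := S.toList.length
  let f := shifts.foldl pvApplyShift (pvFenwickInit n)
  let result := (List.range n).foldl
    (fun acc (i : Nat) =>
      acc ++ [Char.ofNat ((PySem.Int.mod (((PySem.List.pyGetD S.toList (i : Int) ' ').toNat : Int)
        - 97 + pvPrefix f (i : Int)) 26 + 97).toNat)]) []
  String.mk result

-- ===== PORT B =====

-- the body of the `for start, end, direction in shifts` loop
def pvAltStep (n : Nat) (diff : List Int) (sh : Int × Int × Int) : List Int :=
  let d : Int := if sh.2.2 ≠ 0 then 1 else -1
  let diff1 := if sh.1 ≤ (n : Int)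
    then PySem.List.pySetD diff sh.1 (PySem.List.pyGetD diff sh.1 0 + d) else diff
  if sh.2.1 + 1 ≤ (n : Int)
    then PySem.List.pySetD diff1 (sh.2.1 + 1) (PySem.List.pyGetD diff1 (sh.2.1 + 1) 0 - d) else diff1

-- the `for start, end, direction in shifts` loop building the difference array
def pvAltDiff (n : Nat) (shifts : List (Int × Int × Int)) : List Int :=
  shifts.foldl (pvAltStep n) (List.replicate (n + 1) 0)

-- the `for i, c in enumerate(S)` loop: k is the enumeration index, run the running sum
def pvAltLoop (diff : List Int) : List Char → Nat → Int → List Char → List Char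
  | [], _, _, out => out
  | c :: cs, k, run, out =>
    let run' := run + PySem.List.pyGetD diff (k : Int) 0
    pvAltLoop diff cs (k + 1) run'
      (out ++ [Char.ofNat ((PySem.Int.mod ((c.toNat : Int) - 97 + run') 26 + 97).toNat)])

def shifting_fenwick_alt (S : String) (shifts : List (Int × Int × Int)) : String :=
  let n := S.toList.length
  let diff := pvAltDiff n shifts
  String.mk (pvAltLoop diff S.toList 0 0 [])

-- ===== PRECONDITION & SPEC =====

-- Pre_ excludes exactly the inputs on which A never returns (Python loops forever): a shift with
-- start < 0 or end < -1 makes `update_item` run with an index that reaches 0, where lsb(0) = 0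
-- stops the index from advancing.
def Pre_shifting_fenwick (S : String) (shifts : List (Int × Int × Int)) : Prop :=
  ∀ sh ∈ shifts, 0 ≤ sh.1 ∧ -1 ≤ sh.2.1
instance (S : String) (shifts : List (Int × Int × Int)) : Decidable (Pre_shifting_fenwick S shifts) := by
  unfold Pre_shifting_fenwick; infer_instance

def pvWitness_shifting_fenwick : String × (List (Int × Int × Int)) :=
  ("abcz", [(0, 1, 1), (1, 3, 0), (2, 2, 1)])

def Spec_shifting_fenwick (S : String) (shifts : List (Int × Int × Int)) (out : String) : Prop := out = shifting_fenwick_alt S shifts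
instance (S : String) (shifts : List (Int × Int × Int)) (out : String) : Decidable (Spec_shifting_fenwick S shifts out) := by unfold Spec_shifting_fenwick; infer_instance

-- ===== CLAIM (what is proved, stated in full; the proofs are below) =====
def Claim_equal_shifting_fenwick : Prop := ∀ (S : String) (shifts : List (Int × Int × Int)), Dom_shifting_fenwick S shifts → Pre_shifting_fenwick S shifts → Spec_shifting_fenwick S shifts (shifting_fenwick S shifts)

-- ===== LEMMAS AND PROOFS =====

-- ---------- lsb: for n > 0, n & -n = n - (n &&& (n-1)) = the lowest set bit 2^s ----------

def lsbN (n : Nat) : Nat := n - (n &&& (n - 1))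

theorem pv_and_pred (u s : Nat) :
    ((2 * u + 1) * 2 ^ s) &&& ((2 * u + 1) * 2 ^ s - 1) = u * 2 ^ (s + 1) := by
  have hpow : 0 < 2 ^ s := Nat.two_pow_pos s
  have hpow1 : 0 < 2 ^ (s + 1) := Nat.two_pow_pos (s + 1)
  have h1 : (2 * u + 1) * 2 ^ s = 2 ^ (s + 1) * u + 2 ^ s := by ring
  have h2 : (2 * u + 1) * 2 ^ s - 1 = 2 ^ (s + 1) * u + (2 ^ s - 1) := by
    rw [h1]; omega
  have h3 : u * 2 ^ (s + 1) = 2 ^ (s + 1) * u + 0 := by ring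
  rw [h2, h1, h3]
  apply Nat.eq_of_testBit_eq
  intro i
  rw [Nat.testBit_and,
    Nat.testBit_two_pow_mul_add u (show 2 ^ s < 2 ^ (s + 1) by omega) i,
    Nat.testBit_two_pow_mul_add u (show 2 ^ s - 1 < 2 ^ (s + 1) by omega) i,
    Nat.testBit_two_pow_mul_add u (show 0 < 2 ^ (s + 1) by omega) i]
  by_cases hi : i < s + 1
  · simp only [hi, if_true, Nat.testBit_two_pow, Nat.testBit_two_pow_sub_one, Nat.zero_testBit]
    by_cases hsi : s = i
    · subst hsi; simp
    · simp [hsi]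
  · simp only [hi, if_false, Bool.and_self]

theorem pv_lsb_decomp (n : Nat) (h : 0 < n) :
    ∃ s u : Nat, n = (2 * u + 1) * 2 ^ s ∧ lsbN n = 2 ^ s := by
  obtain ⟨k, m, hm, hn⟩ := Nat.exists_eq_two_pow_mul_odd (show n ≠ 0 by omega)
  obtain ⟨u, hu⟩ := hm
  have hn' : n = (2 * u + 1) * 2 ^ k := by rw [hn, hu]; ring
  refine ⟨k, u, hn', ?_⟩
  unfold lsbN
  rw [hn', pv_and_pred]
  have hpow : 0 < 2 ^ k := Nat.two_pow_pos k
  have : (2 * u + 1) * 2 ^ k = u * 2 ^ (k + 1) + 2 ^ k := by ring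
  omega

theorem pv_lsbN_pos {n : Nat} (h : 0 < n) : 0 < lsbN n := by
  obtain ⟨s, u, _, h2⟩ := pv_lsb_decomp n h
  rw [h2]; exact Nat.two_pow_pos s

theorem pv_lsbN_le {n : Nat} (h : 0 < n) : lsbN n ≤ n := by
  obtain ⟨s, u, h1, h2⟩ := pv_lsb_decomp n h
  rw [h2, h1]; nlinarith [Nat.two_pow_pos s]

theorem pv_pvLsb_natCast (n : Nat) (h : 0 < n) : pvLsb (n : Int) = (lsbN n : Int) := by
  have h1 : (0 : Int) ≤ (n : Int) := by positivity
  have h2 : ¬ (0 : Int) ≤ -(n : Int) := by omega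
  unfold pvLsb lsbN
  rw [PySem.Int.band]
  simp only [h1, h2, if_true, if_false]
  have h3 : (-(-(n : Int)) - 1).toNat = n - 1 := by omega
  have h4 : ((n : Int)).toNat = n := by omega
  rw [h3, h4]

-- ---------- the set of internal indices visited by update_item starting at index a ----------

def pvInUpd (L a b : Nat) : Bool :=
  if _h : 1 ≤ a ∧ a < L then (b == a) || pvInUpd L (a + lsbN a) b else false
termination_by L - a
decreasing_by
  have := pv_lsbN_pos (show 0 < a by omega)
  omega

theorem pvInUpd_ge {L a b : Nat} (h : pvInUpd L a b = true) : a ≤ b := by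
  by_cases hc : 1 ≤ a ∧ a < L
  · rw [pvInUpd, dif_pos hc] at h
    rcases Bool.or_eq_true_iff.mp h with h' | h'
    · have h'' : b = a := by simpa using h'
      omega
    · have := pvInUpd_ge h'
      have := pv_lsbN_pos (show 0 < a by omega)
      omega
  · rw [pvInUpd, dif_neg hc] at h; exact absurd h (by simp)
termination_by L - a
decreasing_by
  have := pv_lsbN_pos (show 0 < a by omega)
  omega

theorem pv_core1 (u s m t : Nat)
    (h3 : (2*u+1)*2^s ≤ m*2^(t+1))
    (h1 : m*2^(t+1) < (2*u+1)*2^s + 2^s)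
    (h2 : (2*u+1)*2^s + 2^s ≤ m*2^(t+1) + 2^t) : False := by
  rcases Nat.lt_or_ge t s with hts | hst
  · have hp : 2^(s+1) = 2^(s-t) * 2^(t+1) := by rw [← pow_add]; congr 1; omega
    have he : (2*u+1)*2^s + 2^s = ((u+1) * 2^(s-t)) * 2^(t+1) := by
      have h' : (2*u+1)*2^s + 2^s = (u+1) * 2^(s+1) := by ring
      rw [h', hp]; ring
    rw [he] at h1 h2
    have hm : m < (u+1) * 2^(s-t) := Nat.lt_of_mul_lt_mul_right h1
    have he2 : ((u+1) * 2^(s-t)) * 2^(t+1) = (2*((u+1) * 2^(s-t))) * 2^t := by ring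
    have he3 : m*2^(t+1) + 2^t = (2*m+1) * 2^t := by ring
    rw [he2, he3] at h2
    have : 2*((u+1) * 2^(s-t)) ≤ 2*m+1 := Nat.le_of_mul_le_mul_right h2 (Nat.two_pow_pos t)
    omega
  · have hp : 2^(t+1) = 2^(t-s) * (2^s * 2) := by
      rw [← pow_succ, ← pow_add]; congr 1; omega
    have he : m*2^(t+1) = (2*(m * 2^(t-s))) * 2^s := by rw [hp]; ring
    rw [he] at h3 h1
    have h1' : (2*(m * 2^(t-s))) * 2^s < (2*u+2) * 2^s := by nlinarith
    have hA : 2*u+1 ≤ 2*(m * 2^(t-s)) := Nat.le_of_mul_le_mul_right h3 (Nat.two_pow_pos s)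
    have hB : 2*(m * 2^(t-s)) < 2*u+2 := Nat.lt_of_mul_lt_mul_right h1'
    omega

theorem pv_core2 (u s m t : Nat)
    (h1 : m*2^(t+1) < (2*u+1)*2^s)
    (hab : (2*u+1)*2^s < (2*m+1)*2^t) :
    (2*u+1)*2^s + 2^s ≤ (2*m+1)*2^t := by
  have hst : s < t := by
    by_contra h
    push Not at h
    have hp : 2^s = 2^(s-t) * 2^t := by rw [← pow_add]; congr 1; omega
    have hea : (2*u+1)*2^s = ((2*u+1) * 2^(s-t)) * 2^t := by rw [hp]; ring
    rw [hea] at h1 hab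
    have he1 : m*2^(t+1) = (2*m) * 2^t := by ring
    rw [he1] at h1
    have hA : 2*m < (2*u+1) * 2^(s-t) := Nat.lt_of_mul_lt_mul_right h1
    have hB : (2*u+1) * 2^(s-t) < 2*m+1 := Nat.lt_of_mul_lt_mul_right hab
    omega
  have hp : 2^t = 2^(t-s) * 2^s := by rw [← pow_add]; congr 1; omega
  have hfb : (2*m+1)*2^t = ((2*m+1) * 2^(t-s)) * 2^s := by rw [hp]; ring
  rw [hfb] at hab ⊢
  have h4 : 2*u+1 < (2*m+1) * 2^(t-s) := Nat.lt_of_mul_lt_mul_right hab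
  have h5 : (2*u+2) * 2^s ≤ ((2*m+1) * 2^(t-s)) * 2^s := Nat.mul_le_mul_right _ (by omega)
  calc (2*u+1)*2^s + 2^s = (2*u+2) * 2^s := by ring
    _ ≤ ((2*m+1) * 2^(t-s)) * 2^s := h5

-- the key Fenwick fact: node b is visited by the update starting at a  ⟺  b - lsb(b) < a ≤ b
theorem pvInUpd_iff (L a b : Nat) (ha : 1 ≤ a) (hb : 1 ≤ b) (hbL : b < L) :
    pvInUpd L a b = true ↔ (b - lsbN b < a ∧ a ≤ b) := by
  obtain ⟨t, m, hbdec, hlsbb⟩ := pv_lsb_decomp b hb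
  have hbt : 0 < 2 ^ t := Nat.two_pow_pos t
  have hbm : b - lsbN b = m * 2 ^ (t+1) := by
    have h' : (2*m+1) * 2^t = m * 2^(t+1) + 2^t := by ring
    omega
  suffices H : ∀ k a, 1 ≤ a → L - a ≤ k →
      (pvInUpd L a b = true ↔ (b - lsbN b < a ∧ a ≤ b)) from H (L - a) a ha le_rfl
  intro k
  induction k with
  | zero =>
    intro a ha hk
    rw [pvInUpd, dif_neg (by omega)]
    simp only [Bool.false_eq_true, false_iff]
    omega
  | succ k ih =>
    intro a ha hk
    by_cases hc : a < L
    · rw [pvInUpd, dif_pos ⟨ha, hc⟩]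
      obtain ⟨s, u, hadec, hlsba⟩ := pv_lsb_decomp a (by omega)
      have hat : 0 < 2 ^ s := Nat.two_pow_pos s
      have hlpos : 0 < lsbN a := by rw [hlsba]; exact hat
      have ih' := ih (a + lsbN a) (by omega) (by omega)
      rw [Bool.or_eq_true, beq_iff_eq, ih']
      constructor
      · rintro (rfl | ⟨h1, h2⟩)
        · omega
        · refine ⟨?_, by omega⟩
          by_contra h3
          push Not at h3
          rw [hbm] at h1 h3
          rw [hlsba] at h1 h2
          rw [hadec] at h1 h2 h3
          rw [hbdec] at h2
          have h2' : (2*u+1)*2^s + 2^s ≤ m*2^(t+1) + 2^t := by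
            have h'' : (2*m+1) * 2^t = m * 2^(t+1) + 2^t := by ring
            omega
          exact pv_core1 u s m t h3 (by omega) h2'
      · rintro ⟨h1, h2⟩
        rcases Nat.eq_or_lt_of_le h2 with heq | hlt
        · left; omega
        · right
          refine ⟨by omega, ?_⟩
          rw [hlsba, hadec]
          rw [hbm, hadec] at h1
          rw [hadec, hbdec] at hlt
          rw [hbdec]
          exact pv_core2 u s m t h1 hlt
    · rw [pvInUpd, dif_neg (by omega)]
      simp only [Bool.false_eq_true, false_iff]
      omega


-- ---------- qsumN: the value computed by the prefix_sum while-loop, as a function of the cells ----------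

def qsumN (g : Nat → Int) (b : Nat) : Int :=
  if _h : 0 < b then g b + qsumN g (b - lsbN b) else 0
termination_by b
decreasing_by
  have := pv_lsbN_pos _h
  omega

theorem qsumN_zero_fun (b : Nat) : qsumN (fun _ => (0 : Int)) b = 0 := by
  induction b using Nat.strong_induction_on with
  | _ b ih =>
    rw [qsumN]
    split
    · rename_i h
      rw [ih _ (by have := pv_lsbN_pos h; omega)]; ring
    · rfl

theorem qsumN_congr {g g' : Nat → Int} (h : ∀ j, g j = g' j) (b : Nat) :
    qsumN g b = qsumN g' b := by
  induction b using Nat.strong_induction_on with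
  | _ b ih =>
    rw [qsumN]
    split
    · rename_i hb
      rw [h, ih _ (by have := pv_lsbN_pos hb; omega)]
      conv_rhs => rw [qsumN]
      rw [dif_pos hb]
    · rename_i hb
      conv_rhs => rw [qsumN]
      rw [dif_neg hb]

-- ---------- list cell access ----------

theorem pv_getD_set (xs : List Int) (n : Nat) (v : Int) (j : Nat) :
    (xs.set n v).getD j 0 = if j = n ∧ n < xs.length then v else xs.getD j 0 := by
  by_cases h2 : n < xs.length
  · by_cases h1 : j = n
    · subst h1
      simp [List.getD_eq_getElem?_getD, h2]
    · have h1' : ¬ (n = j) := fun h => h1 h.symm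
      rw [if_neg (show ¬ (j = n ∧ n < xs.length) from fun h => h1 h.1)]
      simp [List.getD_eq_getElem?_getD, h1']
  · rw [List.set_eq_of_length_le (by omega), if_neg (fun h => absurd h.2 h2)]

theorem pv_getD_replicate (m j : Nat) : (List.replicate m (0 : Int)).getD j 0 = 0 := by
  simp only [List.getD_eq_getElem?_getD, List.getElem?_replicate]
  by_cases h : j < m <;> simp [h]

-- ---------- update_item: pointwise effect and length ----------

theorem pv_updLoop_length (fuel : Nat) (items : List Int) (i x : Int) :
    (pvUpdLoop items i x fuel).length = items.length := by
  induction fuel generalizing items i with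
  | zero => rfl
  | succ f ih =>
    simp only [pvUpdLoop]
    split
    · rw [ih, PySem.List.length_pySetD]
    · rfl

theorem pv_updLoop_getD (fuel : Nat) : ∀ (a : Nat) (items : List Int) (x : Int),
    1 ≤ a → items.length ≤ a + fuel → ∀ j : Nat,
    (pvUpdLoop items (a : Int) x fuel).getD j 0
      = items.getD j 0 + (if pvInUpd items.length a j then x else 0) := by
  induction fuel with
  | zero =>
    intro a items x ha hf j
    simp only [pvUpdLoop]
    rw [pvInUpd, dif_neg (by omega)]
    simp
  | succ f ih =>
    intro a items x ha hf j
    simp only [pvUpdLoop, PySem.List.len_eq]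
    by_cases hc : (a : Int) < (items.length : Int)
    · rw [if_pos hc]
      have hcl : a < items.length := by exact_mod_cast hc
      have hlsb := pv_lsbN_pos (show 0 < a by omega)
      have hcast : (a : Int) + pvLsb (a : Int) = ((a + lsbN a : Nat) : Int) := by
        rw [pv_pvLsb_natCast a (by omega)]; push_cast; ring
      rw [hcast, PySem.List.pySetD_natCast, PySem.List.pyGetD_natCast]
      rw [ih (a + lsbN a) _ x (by omega)
        (by rw [List.length_set]; omega) j]
      rw [List.length_set, pv_getD_set]
      conv_rhs => rw [pvInUpd]
      rw [dif_pos ⟨ha, hcl⟩]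
      by_cases hj : j = a
      · subst hj
        have hfalse : pvInUpd items.length (j + lsbN j) j = false := by
          cases h : pvInUpd items.length (j + lsbN j) j
          · rfl
          · exact absurd (pvInUpd_ge h) (by omega)
        rw [hfalse]
        simp [hcl]
      · have : (j == a) = false := by simp [hj]
        rw [if_neg (show ¬ (j = a ∧ a < items.length) from fun h => hj h.1)]
        simp only [this, Bool.false_or]
    · rw [if_neg hc]
      rw [pvInUpd, dif_neg (by omega)]
      simp

theorem pv_update_length (items : List Int) (i x : Int) :
    (pvUpdate items i x).length = items.length := by
  unfold pvUpdate; exact pv_updLoop_length _ _ _ _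

theorem pv_update_getD (items : List Int) (p : Nat) (x : Int) (j : Nat) :
    (pvUpdate items (p : Int) x).getD j 0
      = items.getD j 0 + (if pvInUpd items.length (p + 1) j then x else 0) := by
  unfold pvUpdate
  rw [show ((p : Int) + 1) = ((p + 1 : Nat) : Int) by push_cast; ring]
  exact pv_updLoop_getD items.length (p + 1) items x (by omega) (by omega) j

-- ---------- prefix_sum ----------

theorem pv_qLoop_eq (fuel : Nat) : ∀ (b : Nat) (items : List Int) (s : Int), b ≤ fuel →
    pvQLoop items (b : Int) s fuel = s + qsumN (fun j => items.getD j 0) b := by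
  induction fuel with
  | zero =>
    intro b items s hf
    have hb : b = 0 := by omega
    subst hb
    simp only [pvQLoop]
    rw [qsumN, dif_neg (by omega)]
    ring
  | succ f ih =>
    intro b items s hf
    simp only [pvQLoop]
    by_cases hb : 0 < b
    · rw [if_pos (by exact_mod_cast hb)]
      have hle := pv_lsbN_le hb
      have hpos := pv_lsbN_pos hb
      have hcast : (b : Int) - pvLsb (b : Int) = ((b - lsbN b : Nat) : Int) := by
        rw [pv_pvLsb_natCast b hb]; omega
      rw [hcast, PySem.List.pyGetD_natCast]
      rw [ih (b - lsbN b) items _ (by omega)]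
      conv_rhs => rw [qsumN]
      rw [dif_pos hb]
      ring
    · rw [if_neg (by exact_mod_cast hb)]
      rw [qsumN, dif_neg hb]
      ring

theorem pv_prefix_eq (items : List Int) (q : Nat) :
    pvPrefix items (q : Int) = items.getD 0 0 + qsumN (fun j => items.getD j 0) (q + 1) := by
  unfold pvPrefix
  rw [show ((q : Int) + 1) = ((q + 1 : Nat) : Int) by push_cast; ring]
  rw [show (((q + 1 : Nat) : Int)).toNat = q + 1 by omega]
  rw [PySem.List.pyGetD_zero]
  exact pv_qLoop_eq (q + 1) (q + 1) items _ le_rfl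

-- ---------- the exchange lemma: one update shifts every prefix sum past p by x ----------

theorem pv_qsum_update (items : List Int) (p : Nat) (x : Int) (b : Nat) (hb : b < items.length) :
    qsumN (fun j => (pvUpdate items (p : Int) x).getD j 0) b
      = qsumN (fun j => items.getD j 0) b + (if p + 1 ≤ b then x else 0) := by
  induction b using Nat.strong_induction_on with
  | _ b ih =>
    by_cases hb0 : 0 < b
    · have hlp := pv_lsbN_pos hb0
      have hll := pv_lsbN_le hb0
      have e1 : qsumN (fun j => (pvUpdate items (p : Int) x).getD j 0) b
          = (pvUpdate items (p : Int) x).getD b 0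
            + qsumN (fun j => (pvUpdate items (p : Int) x).getD j 0) (b - lsbN b) := by
        rw [qsumN, dif_pos hb0]
      have e2 : qsumN (fun j => items.getD j 0) b
          = items.getD b 0 + qsumN (fun j => items.getD j 0) (b - lsbN b) := by
        rw [qsumN, dif_pos hb0]
      rw [e1, e2, ih (b - lsbN b) (by omega) (by omega)]
      rw [pv_update_getD items p x b]
      have hK := pvInUpd_iff items.length (p + 1) b (by omega) (by omega) hb
      by_cases h1 : pvInUpd items.length (p + 1) b
      · have hK' := hK.mp h1
        rw [if_pos h1, if_neg (by omega), if_pos (by omega)]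
        ring
      · have hknot : ¬ (b - lsbN b < p + 1 ∧ p + 1 ≤ b) := fun hh => h1 (hK.mpr hh)
        rw [if_neg h1]
        by_cases h2 : p + 1 ≤ b - lsbN b
        · rw [if_pos h2, if_pos (by omega)]
          ring
        · rw [if_neg h2, if_neg (by omega)]
          ring
    · have hb' : b = 0 := by omega
      subst hb'
      rw [qsumN, dif_neg (by omega), qsumN, dif_neg (by omega)]
      simp

theorem pv_prefix_update (items : List Int) (p : Nat) (x : Int) (q : Nat)
    (hq : q + 1 < items.length) :
    pvPrefix (pvUpdate items (p : Int) x) (q : Int)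
      = pvPrefix items (q : Int) + (if (p : Int) ≤ (q : Int) then x else 0) := by
  rw [pv_prefix_eq, pv_prefix_eq]
  have h0 : (pvUpdate items (p : Int) x).getD 0 0 = items.getD 0 0 := by
    rw [pv_update_getD]
    have hfalse : pvInUpd items.length (p + 1) 0 = false := by
      cases h : pvInUpd items.length (p + 1) 0
      · rfl
      · exact absurd (pvInUpd_ge h) (by omega)
    rw [hfalse]; simp
  rw [h0, pv_qsum_update items p x (q + 1) hq]
  by_cases hpq : p + 1 ≤ q + 1
  · rw [if_pos hpq, if_pos (by omega)]; ring
  · rw [if_neg hpq, if_neg (by omega)]; ring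

theorem pv_prefix_update_int (items : List Int) (sz : Int) (hs : 0 ≤ sz) (x : Int) (q : Nat)
    (hq : q + 1 < items.length) :
    pvPrefix (pvUpdate items sz x) (q : Int)
      = pvPrefix items (q : Int) + (if sz ≤ (q : Int) then x else 0) := by
  have hsz : sz = ((sz.toNat : Nat) : Int) := by omega
  rw [hsz]
  exact pv_prefix_update items sz.toNat x q hq

-- ---------- the initial all-zero Fenwick tree ----------

theorem pv_initfold_length (l : List Nat) (items : List Int) :
    (l.foldl (fun it (i : Nat) => pvUpdate it (i : Int) 0) items).length = items.length := by
  induction l generalizing items with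
  | nil => rfl
  | cons i rest ih => rw [List.foldl_cons, ih, pv_update_length]

theorem pv_initfold_getD (l : List Nat) (items : List Int)
    (h : ∀ j : Nat, items.getD j 0 = 0) :
    ∀ j : Nat, (l.foldl (fun it (i : Nat) => pvUpdate it (i : Int) 0) items).getD j 0 = 0 := by
  induction l generalizing items with
  | nil => exact h
  | cons i rest ih =>
    rw [List.foldl_cons]
    apply ih
    intro j
    rw [pv_update_getD, h j]
    split <;> ring

theorem pv_init_length (n : Nat) : (pvFenwickInit n).length = n + 2 := by
  unfold pvFenwickInit
  rw [pv_initfold_length, List.length_replicate]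

theorem pv_init_getD (n j : Nat) : (pvFenwickInit n).getD j 0 = 0 :=
  pv_initfold_getD _ _ (fun j => pv_getD_replicate _ j) j

theorem pv_prefix_init (n q : Nat) : pvPrefix (pvFenwickInit n) (q : Int) = 0 := by
  rw [pv_prefix_eq, pv_init_getD,
    qsumN_congr (g' := fun _ => (0 : Int)) (fun j => pv_init_getD n j) (q + 1),
    qsumN_zero_fun]
  ring

-- ---------- the net shift each index receives ----------

def pvF (shifts : List (Int × Int × Int)) (q : Int) : Int :=
  (shifts.map (fun sh => (if sh.2.2 ≠ 0 then (1 : Int) else -1)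
    * ((if sh.1 ≤ q then (1 : Int) else 0) - (if sh.2.1 + 1 ≤ q then (1 : Int) else 0)))).sum

def pvChar (c : Char) (z : Int) : Char :=
  Char.ofNat ((PySem.Int.mod ((c.toNat : Int) - 97 + z) 26 + 97).toNat)

theorem pv_applyShift_length (it : List Int) (sh : Int × Int × Int) :
    (pvApplyShift it sh).length = it.length := by
  unfold pvApplyShift
  split <;> rw [pv_update_length, pv_update_length]

theorem pv_foldA_prefix (shifts : List (Int × Int × Int)) :
    ∀ (items : List Int) (q : Nat),
    (∀ sh ∈ shifts, 0 ≤ sh.1 ∧ -1 ≤ sh.2.1) → q + 1 < items.length →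
    pvPrefix (shifts.foldl pvApplyShift items) (q : Int)
      = pvPrefix items (q : Int) + pvF shifts (q : Int) := by
  induction shifts with
  | nil => intro items q _ _; simp [pvF]
  | cons sh rest ih =>
    intro items q hpre hq
    obtain ⟨hs, he⟩ := hpre sh (by simp)
    rw [List.foldl_cons,
      ih (pvApplyShift items sh) q (fun s hs' => hpre s (by simp [hs']))
        (by rw [pv_applyShift_length]; omega)]
    have happ : pvPrefix (pvApplyShift items sh) (q : Int)
        = pvPrefix items (q : Int) + (if sh.2.2 ≠ 0 then (1 : Int) else -1)
          * ((if sh.1 ≤ (q : Int) then (1 : Int) else 0)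
            - (if sh.2.1 + 1 ≤ (q : Int) then (1 : Int) else 0)) := by
      unfold pvApplyShift
      by_cases hd : sh.2.2 ≠ 0
      · rw [if_pos hd,
          pv_prefix_update_int _ (sh.2.1 + 1) (by omega) _ q (by rw [pv_update_length]; omega),
          pv_prefix_update_int _ sh.1 hs _ q hq, if_pos hd]
        split_ifs <;> ring
      · rw [if_neg hd,
          pv_prefix_update_int _ (sh.2.1 + 1) (by omega) _ q (by rw [pv_update_length]; omega),
          pv_prefix_update_int _ sh.1 hs _ q hq, if_neg hd]
        split_ifs <;> ring
    rw [happ]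
    simp only [pvF, List.map_cons, List.sum_cons]
    ring

-- A in normal form: character i is shifted by the net shift pvF
theorem pv_A_eq (S : String) (shifts : List (Int × Int × Int))
    (hpre : Pre_shifting_fenwick S shifts) :
    shifting_fenwick S shifts
      = String.mk ((List.range S.toList.length).map
          (fun i => pvChar (S.toList.getD i ' ') (pvF shifts (i : Int)))) := by
  unfold shifting_fenwick
  dsimp only
  rw [PySem.List.foldl_append_singleton_eq_map, List.nil_append]
  congr 1
  apply List.map_congr_left
  intro i hi
  rw [List.mem_range] at hi
  rw [PySem.List.pyGetD_natCast]
  unfold pvChar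
  rw [pv_foldA_prefix shifts (pvFenwickInit S.toList.length) i hpre
    (by rw [pv_init_length]; omega), pv_prefix_init]
  norm_num

-- ---------- B side: the difference array holds the per-index deltas ----------

def pvDiffVal (n : Nat) (shifts : List (Int × Int × Int)) (jz : Int) : Int :=
  (shifts.map (fun sh =>
    (if sh.1 = jz then (if sh.1 ≤ (n : Int) then (if sh.2.2 ≠ 0 then (1 : Int) else -1) else 0) else 0)
    - (if sh.2.1 + 1 = jz then (if sh.2.1 + 1 ≤ (n : Int) then (if sh.2.2 ≠ 0 then (1 : Int) else -1) else 0) else 0))).sum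

theorem pv_altStep_length (n : Nat) (diff : List Int) (sh : Int × Int × Int) :
    (pvAltStep n diff sh).length = diff.length := by
  unfold pvAltStep
  split_ifs <;> simp [PySem.List.length_pySetD]

theorem pv_altStep_getD (n : Nat) (diff : List Int) (sh : Int × Int × Int)
    (hlen : diff.length = n + 1) (hs : 0 ≤ sh.1) (he : -1 ≤ sh.2.1) (j : Nat) (hj : j ≤ n) :
    (pvAltStep n diff sh).getD j 0 = diff.getD j 0 +
      ((if sh.1 = (j : Int) then (if sh.1 ≤ (n : Int) then (if sh.2.2 ≠ 0 then (1 : Int) else -1) else 0) else 0)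
      - (if sh.2.1 + 1 = (j : Int) then (if sh.2.1 + 1 ≤ (n : Int) then (if sh.2.2 ≠ 0 then (1 : Int) else -1) else 0) else 0)) := by
  obtain ⟨p, hp⟩ : ∃ p : Nat, sh.1 = (p : Int) := ⟨sh.1.toNat, by omega⟩
  obtain ⟨qq, hq⟩ : ∃ qq : Nat, sh.2.1 + 1 = (qq : Int) := ⟨(sh.2.1 + 1).toNat, by omega⟩
  unfold pvAltStep
  rw [hp, hq]
  simp only [PySem.List.pySetD_natCast, PySem.List.pyGetD_natCast, Nat.cast_le, Nat.cast_inj]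
  by_cases hg1 : p ≤ n
  · by_cases hg2 : qq ≤ n
    · rw [if_pos hg1, if_pos hg2, pv_getD_set, pv_getD_set, pv_getD_set]
      simp only [List.length_set, hlen]
      split_ifs <;> first | omega | (subst_vars; omega)
    · rw [if_pos hg1, if_neg hg2, pv_getD_set]
      simp only [hlen]
      split_ifs <;> first | omega | (subst_vars; omega)
  · by_cases hg2 : qq ≤ n
    · rw [if_neg hg1, if_pos hg2, pv_getD_set]
      simp only [hlen]
      split_ifs <;> first | omega | (subst_vars; omega)
    · rw [if_neg hg1, if_neg hg2]
      split_ifs <;> omega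

theorem pv_altDiff_fold_getD (n : Nat) (shifts : List (Int × Int × Int)) :
    ∀ (diff : List Int), diff.length = n + 1 →
    (∀ sh ∈ shifts, 0 ≤ sh.1 ∧ -1 ≤ sh.2.1) → ∀ j : Nat, j ≤ n →
    (shifts.foldl (pvAltStep n) diff).getD j 0 = diff.getD j 0 + pvDiffVal n shifts (j : Int) := by
  induction shifts with
  | nil => intro diff _ _ j _; simp [pvDiffVal]
  | cons sh rest ih =>
    intro diff hlen hpre j hj
    obtain ⟨hs, he⟩ := hpre sh (by simp)
    rw [List.foldl_cons,
      ih (pvAltStep n diff sh) (by rw [pv_altStep_length]; exact hlen)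
        (fun s hs' => hpre s (by simp [hs'])) j hj,
      pv_altStep_getD n diff sh hlen hs he j hj]
    simp only [pvDiffVal, List.map_cons, List.sum_cons]
    ring

theorem pv_altDiff_getD (n : Nat) (shifts : List (Int × Int × Int))
    (hpre : ∀ sh ∈ shifts, 0 ≤ sh.1 ∧ -1 ≤ sh.2.1) (j : Nat) (hj : j ≤ n) :
    (pvAltDiff n shifts).getD j 0 = pvDiffVal n shifts (j : Int) := by
  unfold pvAltDiff
  rw [pv_altDiff_fold_getD n shifts _ (List.length_replicate) hpre j hj, pv_getD_replicate]
  ring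

-- ---------- B side: the running-sum loop ----------

theorem pv_altLoop_eq (diff : List Int) (cs : List Char) :
    ∀ (k : Nat) (run : Int) (out : List Char),
    run = ((List.range k).map (fun t => diff.getD t 0)).sum →
    pvAltLoop diff cs k run out
      = out ++ cs.mapIdx (fun i c =>
          pvChar c (((List.range (k + i + 1)).map (fun t => diff.getD t 0)).sum)) := by
  induction cs with
  | nil => intro k run out _; simp [pvAltLoop]
  | cons c cs ih =>
    intro k run out hrun
    have hrun' : run + PySem.List.pyGetD diff (k : Int) 0
        = ((List.range (k + 1)).map (fun t => diff.getD t 0)).sum := by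
      rw [List.range_succ, List.map_append, List.sum_append, hrun,
        PySem.List.pyGetD_natCast]
      simp
    simp only [pvAltLoop]
    rw [ih (k + 1) _ _ hrun', List.mapIdx_cons]
    rw [List.append_assoc, List.singleton_append]
    congr 2
    · unfold pvChar
      rw [hrun']
    · congr 1
      funext i c
      rw [show k + 1 + i + 1 = k + (i + 1) + 1 by omega]

-- B in normal form
theorem pv_B_eq (S : String) (shifts : List (Int × Int × Int)) :
    shifting_fenwick_alt S shifts
      = String.mk (S.toList.mapIdx (fun i c =>
          pvChar c (((List.range (i + 1)).map
            (fun t => (pvAltDiff S.toList.length shifts).getD t 0)).sum))) := by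
  unfold shifting_fenwick_alt
  dsimp only
  rw [pv_altLoop_eq _ S.toList 0 0 [] (by simp), List.nil_append]
  congr 1
  congr 1
  funext i c
  rw [show 0 + i + 1 = i + 1 by omega]

-- ---------- prefix sums of the difference array equal the Fenwick prefix sums ----------

theorem pv_sum_ind (m : Nat) (z z2 v w : Int) :
    ((List.range m).map (fun (j : Nat) => (if z = (j : Int) then v else 0)
        - (if z2 = (j : Int) then w else 0))).sum
      = (if 0 ≤ z ∧ z < (m : Int) then v else 0) - (if 0 ≤ z2 ∧ z2 < (m : Int) then w else 0) := by
  induction m with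
  | zero =>
    simp only [List.range_zero, List.map_nil, List.sum_nil]
    rw [if_neg (by omega), if_neg (by omega)]
    ring
  | succ m ih =>
    rw [List.range_succ, List.map_append, List.sum_append, ih]
    simp only [List.map_cons, List.map_nil, List.sum_cons, List.sum_nil]
    push_cast
    split_ifs <;> omega

theorem pv_sumDiff_eq_F (n : Nat) (shifts : List (Int × Int × Int)) :
    (∀ sh ∈ shifts, 0 ≤ sh.1 ∧ -1 ≤ sh.2.1) → ∀ i : Nat, i < n →
    ((List.range (i + 1)).map (fun (j : Nat) => pvDiffVal n shifts (j : Int))).sum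
      = pvF shifts (i : Int) := by
  induction shifts with
  | nil => intro _ i _; simp [pvDiffVal, pvF]
  | cons sh rest ih =>
    intro hpre i hi
    obtain ⟨hs, he⟩ := hpre sh (by simp)
    have hsplit : (List.range (i + 1)).map (fun (j : Nat) => pvDiffVal n (sh :: rest) (j : Int))
        = (List.range (i + 1)).map (fun (j : Nat) =>
            ((if sh.1 = (j : Int) then (if sh.1 ≤ (n : Int) then (if sh.2.2 ≠ 0 then (1 : Int) else -1) else 0) else 0)
            - (if sh.2.1 + 1 = (j : Int) then (if sh.2.1 + 1 ≤ (n : Int) then (if sh.2.2 ≠ 0 then (1 : Int) else -1) else 0) else 0))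
            + pvDiffVal n rest (j : Int)) := by
      apply List.map_congr_left
      intro j _
      simp only [pvDiffVal, List.map_cons, List.sum_cons]
    rw [hsplit, PySem.List.sum_map_add_int,
      ih (fun s hs' => hpre s (by simp [hs'])) i hi,
      pv_sum_ind (i + 1) sh.1 (sh.2.1 + 1)]
    simp only [pvF, List.map_cons, List.sum_cons]
    have hin : ((i : Int) + 1 : Int) = ((i + 1 : Nat) : Int) := by push_cast; ring
    have hni : (i : Int) < (n : Int) := by exact_mod_cast hi
    push_cast
    split_ifs <;> omega

-- ---------- final assembly ----------

theorem pv_range_map_getD (cs : List Char) (f : Nat → Char → Char) :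
    (List.range cs.length).map (fun i => f i (cs.getD i ' ')) = cs.mapIdx f := by
  induction cs generalizing f with
  | nil => simp
  | cons c cs ih =>
    rw [List.length_cons, List.range_succ_eq_map, List.map_cons, List.map_map, List.mapIdx_cons]
    congr 1
    rw [← ih (fun i ch => f (i + 1) ch)]
    apply List.map_congr_left
    intro i _
    simp [Function.comp]

-- ===== VERDICT (by name: the statement is the Claim_ definition above) =====
theorem shifting_fenwick_spec : Claim_equal_shifting_fenwick := by
  unfold Claim_equal_shifting_fenwick
  intro S shifts _ hpre
  unfold Spec_shifting_fenwick
  rw [pv_A_eq S shifts hpre, pv_B_eq S shifts]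
  congr 1
  rw [← pv_range_map_getD S.toList (fun i c =>
    pvChar c (((List.range (i + 1)).map
      (fun t => (pvAltDiff S.toList.length shifts).getD t 0)).sum))]
  apply List.map_congr_left
  intro i hi
  rw [List.mem_range] at hi
  have hsum : ((List.range (i + 1)).map
      (fun t => (pvAltDiff S.toList.length shifts).getD t 0)).sum
      = pvF shifts (i : Int) := by
    rw [show (List.range (i + 1)).map (fun t => (pvAltDiff S.toList.length shifts).getD t 0)
        = (List.range (i + 1)).map (fun (t : Nat) => pvDiffVal S.toList.length shifts (t : Int)) from
      List.map_congr_left (fun t ht => by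
        rw [List.mem_range] at ht
        exact pv_altDiff_getD S.toList.length shifts hpre t (by omega))]
    exact pv_sumDiff_eq_F S.toList.length shifts hpre i hi
  rw [hsum]
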